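-- pv_equiv track=rewrite | github.com/hsn8086/exam | luogu/p2036.py | solve
-- ===== SOURCE A (Python) =====
-- from itertools import  combinations
--
-- def solve(n, a):
--     ans = float('inf')
--
--     for i in range(1, n + 1):
--         for combo in combinations(a, i):
--
--             total_sour = 1
--             total_bitter = 0
--             for s, b in combo:
--                 total_sour *= s
--                 total_bitter += b
--             ans = min(ans, abs(total_sour - total_bitter))
--
--     return ans
-- ===== SOURCE B (Python) =====
-- def solve(n, a):
--     m = len(a)
--     best = None
--
--     def dfs(start, depth, prod, tot):
--         nonlocal best
--         for j in range(start, m):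
--             s, b = a[j]
--             p = prod * s
--             v = abs(p - (tot + b))
--             if best is None or v < best:
--                 best = v
--             if depth + 1 < n:
--                 dfs(j + 1, depth + 1, p, tot + b)
--
--     dfs(0, 0, 1, 0)
--     return best
-- ===== Notes on version B (the rewrite author's own statement) =====
-- stated objective: alternative
-- what changed: Replaced the per-size itertools.combinations enumeration that recomputes each subset's product and sum from scratch by a DFS over indices that carries the running product and bitter-sum incrementally (measured ~2x at moderate sizes, unconfirmed at the largest).
-- outside the precondition, e.g. on solve(1, []): A returns inf, B returns None; on solve(0, [(1, 1)]): A returns inf, B returns 0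
import Mathlib
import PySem

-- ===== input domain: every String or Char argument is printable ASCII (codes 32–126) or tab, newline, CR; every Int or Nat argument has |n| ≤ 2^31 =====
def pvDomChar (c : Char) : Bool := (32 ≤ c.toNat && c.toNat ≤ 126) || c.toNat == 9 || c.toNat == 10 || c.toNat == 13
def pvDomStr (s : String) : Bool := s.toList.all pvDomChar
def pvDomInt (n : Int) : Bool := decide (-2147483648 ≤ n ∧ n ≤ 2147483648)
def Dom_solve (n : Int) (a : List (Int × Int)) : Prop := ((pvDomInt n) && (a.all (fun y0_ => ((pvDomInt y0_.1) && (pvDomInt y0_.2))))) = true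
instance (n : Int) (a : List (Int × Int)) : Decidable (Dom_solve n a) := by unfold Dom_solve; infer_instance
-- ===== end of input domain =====

-- B replaces A's per-size combinations enumeration (which recomputes each subset's
-- product and sum from scratch) by a DFS carrying the running product and sum.

-- ===== PORT A =====
-- itertools.combinations(xs, r) in Python's lexicographic-by-index order
def pyCombinations : Nat → List (Int × Int) → List (List (Int × Int))
  | 0, _ => [[]]
  | _ + 1, [] => []
  | r + 1, x :: rest => (pyCombinations r rest).map (x :: ·) ++ pyCombinations (r + 1) rest

-- ans starts as float('inf'); we model it as Option Int (none = inf, only possible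
-- when no combination was seen); the final .getD 0 is unreachable under Pre_solve.
def solve (n : Int) (a : List (Int × Int)) : Int :=
  (((PySem.List.pyRange 1 (n + 1) 1).foldl (fun ans i =>
      (pyCombinations i.toNat a).foldl (fun ans combo =>
        let totalSour := combo.foldl (fun p sb => p * sb.1) 1
        let totalBitter := combo.foldl (fun t sb => t + sb.2) 0
        let v := |totalSour - totalBitter|
        match ans with
        | none => some v
        | some m => some (min m v)) ans) none : Option Int)).getD 0

-- ===== PORT B =====
-- Source B's dfs: the 'for j in range(start, m)' loop is transcribed as structural
-- recursion over the remaining suffix of a; best is threaded as Option Int (None).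
def dfsB (n : Int) : List (Int × Int) → Int → Int → Int → Option Int → Option Int
  | [], _, _, _, best => best
  | (s, b) :: tail, depth, prod, tot, best =>
    let p := prod * s
    let v := |p - (tot + b)|
    let best1 : Option Int := match best with
      | none => some v
      | some m => if v < m then some v else some m
    let best2 := if depth + 1 < n then dfsB n tail (depth + 1) p (tot + b) best1 else best1
    dfsB n tail depth prod tot best2

def solve_alt (n : Int) (a : List (Int × Int)) : Int :=
  (dfsB n a 0 1 0 none).getD 0

-- ===== PRECONDITION & SPEC =====
-- Pre_ excludes n < 1 and the empty list: there no nonempty combination exists, so the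
-- Python A returns float('inf') — not an int — (and B returns None or a size-0-limit value).
def Pre_solve (n : Int) (a : List (Int × Int)) : Prop := 1 ≤ n ∧ a ≠ []
instance (n : Int) (a : List (Int × Int)) : Decidable (Pre_solve n a) := by unfold Pre_solve; infer_instance
def pvWitness_solve : Int × (List (Int × Int)) := (2, [(3, 1), (2, 5)])
def Spec_solve (n : Int) (a : List (Int × Int)) (out : Int) : Prop := out = solve_alt n a
instance (n : Int) (a : List (Int × Int)) (out : Int) : Decidable (Spec_solve n a out) := by unfold Spec_solve; infer_instance

-- ===== CLAIM (what is proved, stated in full; the proofs are below) =====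
def Claim_equal_solve : Prop := ∀ (n : Int) (a : List (Int × Int)), Dom_solve n a → Pre_solve n a → Spec_solve n a (solve n a)

-- ===== LEMMAS AND PROOFS =====

-- the running-minimum step both programs perform
def mstep (o : Option Int) (v : Int) : Option Int :=
  match o with
  | none => some v
  | some m => some (min m v)

-- the value both programs minimise, for a chosen sub-multiset c
def valC (c : List (Int × Int)) : Int := |(c.map Prod.fst).prod - (c.map Prod.snd).sum|

lemma foldl_mstep_some (L : List Int) (m : Int) :
    L.foldl mstep (some m) = some (L.foldl min m) := by
  induction L generalizing m with
  | nil => rfl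
  | cons x L ih => simp [mstep, ih]

lemma foldl_min_mem (L : List Int) (m : Int) : L.foldl min m ∈ m :: L := by
  induction L generalizing m with
  | nil => simp
  | cons x L ih =>
    simp only [List.foldl_cons]
    rcases List.mem_cons.mp (ih (min m x)) with h | h
    · rw [h]
      rcases min_choice m x with hc | hc <;> rw [hc] <;> simp
    · simp [h]

lemma foldl_min_le_init (L : List Int) (m : Int) : L.foldl min m ≤ m := by
  induction L generalizing m with
  | nil => simp
  | cons y L ih => exact le_trans (ih (min m y)) (min_le_left _ _)

lemma foldl_min_le_cons (L : List Int) (m x : Int) (hx : x ∈ m :: L) : L.foldl min m ≤ x := by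
  induction L generalizing m with
  | nil => simp_all
  | cons y L ih =>
    simp only [List.foldl_cons]
    rcases List.mem_cons.mp hx with rfl | hx
    · exact le_trans (foldl_min_le_init L (min x y)) (min_le_left _ _)
    · rcases List.mem_cons.mp hx with rfl | hx
      · exact le_trans (foldl_min_le_init L (min m x)) (min_le_right _ _)
      · exact ih (min m y) (List.mem_cons.mpr (Or.inr hx))

lemma foldl_mstep_eq_of_mem_iff (L L' : List Int)
    (h : ∀ x, x ∈ L ↔ x ∈ L') :
    L.foldl mstep none = L'.foldl mstep none := by
  cases L with
  | nil =>
    cases L' with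
    | nil => rfl
    | cons y L' => exact absurd ((h y).mpr List.mem_cons_self) (by simp)
  | cons x L =>
    cases L' with
    | nil => exact absurd ((h x).mp List.mem_cons_self) (by simp)
    | cons y L' =>
      show (L.foldl mstep (mstep none x)) = (L'.foldl mstep (mstep none y))
      simp only [mstep, foldl_mstep_some]
      congr 1
      apply le_antisymm
      · exact foldl_min_le_cons L x _ ((h _).mpr (foldl_min_mem L' y))
      · exact foldl_min_le_cons L' y _ ((h _).mp (foldl_min_mem L x))

lemma foldl_mul_shift (c : List (Int × Int)) (p : Int) :
    c.foldl (fun p sb => p * sb.1) p = p * (c.map Prod.fst).prod := by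
  induction c generalizing p with
  | nil => simp
  | cons x c ih => simp [ih, mul_assoc]

lemma foldl_add_shift (c : List (Int × Int)) (t : Int) :
    c.foldl (fun t sb => t + sb.2) t = t + (c.map Prod.snd).sum := by
  induction c generalizing t with
  | nil => simp
  | cons x c ih => simp [ih]; ring

-- membership in pyCombinations = sublist of the given length
lemma mem_pyCombinations (r : Nat) (xs c : List (Int × Int)) :
    c ∈ pyCombinations r xs ↔ c.Sublist xs ∧ c.length = r := by
  induction xs generalizing r c with
  | nil =>
    cases r with
    | zero => simp [pyCombinations, List.length_eq_zero_iff]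
    | succ r =>
      simp only [pyCombinations, List.not_mem_nil, false_iff, not_and]
      intro hs
      simp [List.sublist_nil.mp hs]
  | cons x rest ih =>
    cases r with
    | zero =>
      constructor
      · intro h
        simp only [pyCombinations, List.mem_singleton] at h
        subst h; exact ⟨List.nil_sublist _, rfl⟩
      · intro ⟨_, hl⟩
        simp only [pyCombinations, List.mem_singleton]
        exact List.length_eq_zero_iff.mp hl
    | succ r =>
      simp only [pyCombinations, List.mem_append, List.mem_map]
      constructor
      · rintro (⟨c', hc', rfl⟩ | hc)
        · obtain ⟨hs, hl⟩ := (ih r c').mp hc'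
          exact ⟨List.Sublist.cons₂ x hs, by simp [hl]⟩
        · obtain ⟨hs, hl⟩ := (ih (r + 1) c).mp hc
          exact ⟨hs.cons x, hl⟩
      · rintro ⟨hs, hl⟩
        rcases List.sublist_cons_iff.mp hs with hs | ⟨c', rfl, hc'⟩
        · exact Or.inr ((ih (r + 1) c).mpr ⟨hs, hl⟩)
        · refine Or.inl ⟨c', (ih r c').mpr ⟨hc', ?_⟩, rfl⟩
          simpa using hl

-- A's nested fold is a min-fold over the flattened value list
def valsA (n : Int) (a : List (Int × Int)) : List Int :=
  (PySem.List.pyRange 1 (n + 1) 1).flatMap (fun i => (pyCombinations i.toNat a).map valC)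

lemma solve_eq_foldl (n : Int) (a : List (Int × Int)) :
    solve n a = ((valsA n a).foldl mstep none).getD 0 := by
  unfold solve valsA
  rw [List.foldl_flatMap]
  congr 2
  funext ans i
  rw [List.foldl_map]
  congr 1
  funext o c
  simp only [foldl_mul_shift, foldl_add_shift, one_mul, zero_add, mstep, valC]

lemma mem_valsA (n : Int) (a : List (Int × Int)) (x : Int) :
    x ∈ valsA n a ↔
      ∃ c, c.Sublist a ∧ c ≠ [] ∧ (c.length : Int) ≤ n ∧ x = valC c := by
  unfold valsA
  simp only [List.mem_flatMap, List.mem_map, PySem.List.mem_pyRange_one]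
  constructor
  · rintro ⟨i, ⟨hi1, hi2⟩, c, hc, rfl⟩
    obtain ⟨hs, hl⟩ := (mem_pyCombinations _ _ _).mp hc
    refine ⟨c, hs, ?_, ?_, rfl⟩
    · intro h; subst h; simp at hl; omega
    · rw [hl]; omega
  · rintro ⟨c, hs, hne, hlen, rfl⟩
    refine ⟨(c.length : Int), ⟨?_, by omega⟩, c,
      (mem_pyCombinations _ _ _).mpr ⟨hs, by simp⟩, rfl⟩
    have : c.length ≠ 0 := by simpa [List.length_eq_zero_iff] using hne
    omega

-- B's dfs as a min-fold over its own value list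
def valsB (n : Int) : List (Int × Int) → Int → Int → Int → List Int
  | [], _, _, _ => []
  | (s, b) :: tail, depth, prod, tot =>
    |prod * s - (tot + b)| ::
      ((if depth + 1 < n then valsB n tail (depth + 1) (prod * s) (tot + b) else []) ++
        valsB n tail depth prod tot)

lemma dfsB_eq_foldl (n : Int) (rest : List (Int × Int)) (d p t : Int) (best : Option Int) :
    dfsB n rest d p t best = (valsB n rest d p t).foldl mstep best := by
  induction rest generalizing d p t best with
  | nil => rfl
  | cons hd tail ih =>
    obtain ⟨s, b⟩ := hd
    simp only [dfsB, valsB, List.foldl_cons, List.foldl_append]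
    have hstep : (match best with
        | none => some |p * s - (t + b)|
        | some m => if |p * s - (t + b)| < m then some |p * s - (t + b)| else some m)
        = mstep best |p * s - (t + b)| := by
      cases best with
      | none => rfl
      | some m =>
        simp only [mstep, min_def]
        split_ifs <;> simp <;> omega
    rw [hstep]
    split_ifs with h
    · rw [ih, ih]
    · rw [List.foldl_nil, ih]

lemma mem_valsB (n : Int) (rest : List (Int × Int)) (d p t x : Int) (hd : d < n) :
    x ∈ valsB n rest d p t ↔
      ∃ c, c.Sublist rest ∧ c ≠ [] ∧ d + (c.length : Int) ≤ n ∧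
        x = |p * (c.map Prod.fst).prod - (t + (c.map Prod.snd).sum)| := by
  induction rest generalizing d p t with
  | nil =>
    simp only [valsB, List.not_mem_nil, false_iff, not_exists, not_and]
    intro c hs hne
    exact absurd (List.sublist_nil.mp hs) hne
  | cons hd' tail ih =>
    obtain ⟨s, b⟩ := hd'
    simp only [valsB, List.mem_cons, List.mem_append]
    constructor
    · rintro (rfl | h | h)
      · exact ⟨[(s, b)], by simp, by simp, by simpa using hd, by simp⟩
      · rcases Decidable.em (d + 1 < n) with hlt | hlt
        · rw [if_pos hlt] at h
          obtain ⟨c', hs', hne', hlen', rfl⟩ := (ih (d + 1) (p * s) (t + b) hlt).mp h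
          refine ⟨(s, b) :: c', hs'.cons₂ _, by simp, by simp; omega, ?_⟩
          simp [mul_assoc]; ring_nf
        · rw [if_neg hlt] at h; simp at h
      · obtain ⟨c, hs, hne, hlen, rfl⟩ := (ih d p t hd).mp h
        exact ⟨c, hs.cons _, hne, hlen, rfl⟩
    · rintro ⟨c, hs, hne, hlen, rfl⟩
      rcases List.sublist_cons_iff.mp hs with hs | ⟨c', rfl, hc'⟩
      · exact Or.inr (Or.inr ((ih d p t hd).mpr ⟨c, hs, hne, hlen, rfl⟩))
      · cases c' with
        | nil => left; simp
        | cons y c'' =>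
          have hlt : d + 1 < n := by simp at hlen; omega
          right; left
          rw [if_pos hlt]
          refine (ih (d + 1) (p * s) (t + b) hlt).mpr
            ⟨y :: c'', hc', by simp, by simp at hlen ⊢; omega, ?_⟩
          simp [mul_assoc]; ring_nf
-- ===== VERDICT (by name: the statement is the Claim_ definition above) =====
theorem solve_spec : Claim_equal_solve := by
  intro n a _ hpre
  obtain ⟨hn, _⟩ := hpre
  show solve n a = solve_alt n a
  rw [solve_eq_foldl]
  unfold solve_alt
  rw [dfsB_eq_foldl]
  congr 1
  apply foldl_mstep_eq_of_mem_iff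
  intro x
  rw [mem_valsA, mem_valsB n a 0 1 0 x (by omega)]
  constructor
  · rintro ⟨c, hs, hne, hlen, rfl⟩
    exact ⟨c, hs, hne, by omega, by simp [valC]⟩
  · rintro ⟨c, hs, hne, hlen, rfl⟩
    exact ⟨c, hs, hne, by omega, by simp [valC]⟩
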